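-- pv_equiv track=rewrite | github.com/nkchangliu/puzzles | leetcode/friends_circle.py | friends_circle
-- ===== SOURCE A (Python) =====
-- def friends_circle(lst):
--     count = len(lst)
--     heads = list(range(len(lst)))
--     for i in range(len(lst)):
--         for j in range(len(lst)):
--             if lst[i][j] == 1:
--                 hi, hj = find(heads, i), find(heads, j)
--                 if hi != hj:
--                     heads[hi] = hj
--                     count -= 1
--     return count
--
-- def find(heads, i):
--     while heads[i] != i:
--         heads[i] = heads[heads[i]]
--         i = heads[i]
--     return heads[i]
-- ===== SOURCE B (Python) =====
-- def friends_circle(lst):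
--     # Flat component-label merging instead of union-find:
--     # every node carries a label; an edge merges two classes by relabeling.
--     n = len(lst)
--     labels = list(range(n))
--     count = n
--     for i in range(n):
--         for j in range(n):
--             if lst[i][j] == 1 and labels[i] != labels[j]:
--                 old, new = labels[i], labels[j]
--                 labels = [new if x == old else x for x in labels]
--                 count -= 1
--     return count
-- ===== Notes on version B (the rewrite author's own statement) =====
-- stated objective: simpler
-- what changed: Replaces the union-find forest with path halving by a flat component-label array merged with one relabeling pass per union, with no find loop or parent pointers.
import Mathlib
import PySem

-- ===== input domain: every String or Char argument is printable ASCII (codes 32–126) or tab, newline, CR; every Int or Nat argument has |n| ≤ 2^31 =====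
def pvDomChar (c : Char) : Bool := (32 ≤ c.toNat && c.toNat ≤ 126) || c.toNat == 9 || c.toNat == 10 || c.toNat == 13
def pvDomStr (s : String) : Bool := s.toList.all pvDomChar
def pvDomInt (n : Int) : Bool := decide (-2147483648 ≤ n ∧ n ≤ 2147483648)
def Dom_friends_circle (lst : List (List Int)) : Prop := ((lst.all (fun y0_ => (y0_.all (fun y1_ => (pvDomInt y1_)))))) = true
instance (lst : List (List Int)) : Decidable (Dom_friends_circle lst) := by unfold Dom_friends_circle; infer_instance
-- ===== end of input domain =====

-- B replaces A's union-find forest (path halving) by a flat component-label array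
-- merged with one relabeling pass per union; same return value, no speed claim.

-- ===== PORT A =====
-- find(heads, i): while heads[i] != i: heads[i] = heads[heads[i]]; i = heads[i]; return heads[i]
-- ported with fuel (the while-loop's total encoding; heads.length + 1 steps always
-- suffice for the forests A builds, proved via pvDistBound/pvFind_spec below)
def pvFind : Nat → List Int → Int → List Int × Int
  | 0, heads, i => (heads, PySem.List.pyGetD heads i 0)
  | fuel+1, heads, i =>
      let p := PySem.List.pyGetD heads i 0
      if p ≠ i then
        let g := PySem.List.pyGetD heads p 0
        pvFind fuel (PySem.List.pySetD heads i g) g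
      else (heads, p)

def pvBodyA (lst : List (List Int)) (i j : Int) (s : List Int × Int) : List Int × Int :=
  if PySem.List.pyGetD (PySem.List.pyGetD lst i []) j 0 = 1 then
    let f1 := pvFind (s.1.length + 1) s.1 i
    let f2 := pvFind (f1.1.length + 1) f1.1 j
    if f1.2 ≠ f2.2 then (PySem.List.pySetD f2.1 f1.2 f2.2, s.2 - 1) else (f2.1, s.2)
  else s

def friends_circle (lst : List (List Int)) : Int :=
  ((PySem.List.pyRange 0 (lst.length : Int)).foldl (fun s i =>
      (PySem.List.pyRange 0 (lst.length : Int)).foldl (fun s j => pvBodyA lst i j s) s)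
    (PySem.List.pyRange 0 (lst.length : Int), (lst.length : Int))).2

-- ===== PORT B =====
def pvBodyB (lst : List (List Int)) (i j : Int) (s : List Int × Int) : List Int × Int :=
  let old := PySem.List.pyGetD s.1 i 0
  let nw := PySem.List.pyGetD s.1 j 0
  if PySem.List.pyGetD (PySem.List.pyGetD lst i []) j 0 = 1 ∧ old ≠ nw then
    (s.1.map (fun x => if x = old then nw else x), s.2 - 1)
  else s

def friends_circle_alt (lst : List (List Int)) : Int :=
  ((PySem.List.pyRange 0 (lst.length : Int)).foldl (fun s i =>
      (PySem.List.pyRange 0 (lst.length : Int)).foldl (fun s j => pvBodyB lst i j s) s)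
    (PySem.List.pyRange 0 (lst.length : Int), (lst.length : Int))).2

-- ===== PRECONDITION & SPEC =====
-- Pre_ excludes exactly the ragged matrices on which Python A raises IndexError
-- (some row shorter than len(lst)); B raises there too.
def Pre_friends_circle (lst : List (List Int)) : Prop :=
  ∀ row ∈ lst, lst.length ≤ row.length
instance (lst : List (List Int)) : Decidable (Pre_friends_circle lst) := by
  unfold Pre_friends_circle; infer_instance

def pvWitness_friends_circle : List (List Int) := [[1, 1, 0], [1, 1, 0], [0, 0, 1]]

def Spec_friends_circle (lst : List (List Int)) (out : Int) : Prop := out = friends_circle_alt lst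
instance (lst : List (List Int)) (out : Int) : Decidable (Spec_friends_circle lst out) := by
  unfold Spec_friends_circle; infer_instance

-- ===== CLAIM (what is proved, stated in full; the proofs are below) =====
def Claim_equal_friends_circle : Prop := ∀ (lst : List (List Int)), Dom_friends_circle lst → Pre_friends_circle lst → Spec_friends_circle lst (friends_circle lst)

-- ===== LEMMAS AND PROOFS =====

def pvPg (h : List Int) (x : Int) : Int := PySem.List.pyGetD h x 0

def pvIdx (n : Nat) (x : Int) : Prop := 0 ≤ x ∧ x < (n : Int)

def pvIter (h : List Int) (d : Nat) (x : Int) : Int := (pvPg h)^[d] x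

def pvRoot (h : List Int) (x : Int) : Prop := pvPg h x = x

def pvGood (n : Nat) (h : List Int) : Prop :=
  h.length = n ∧ (∀ x, pvIdx n x → pvIdx n (pvPg h x)) ∧
  (∀ x, pvIdx n x → ∃ d, pvRoot h (pvIter h d x))

def pvLab (n : Nat) (h ℓ : List Int) : Prop :=
  ∀ x, pvIdx n x → pvPg ℓ (pvPg h x) = pvPg ℓ x

def pvInv (n : Nat) (h ℓ : List Int) : Prop :=
  pvGood n h ∧ ℓ.length = n ∧ pvLab n h ℓ ∧
  (∀ x y, pvIdx n x → pvIdx n y → pvRoot h x → pvRoot h y → pvPg ℓ x = pvPg ℓ y → x = y)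

theorem pvPg_set {n : Nat} {h : List Int} (hlen : h.length = n) {i x : Int}
    (hi : pvIdx n i) (hx : pvIdx n x) (v : Int) :
    pvPg (PySem.List.pySetD h i v) x = if x = i then v else pvPg h x := by
  obtain ⟨hi0, hi1⟩ := hi
  obtain ⟨hx0, hx1⟩ := hx
  rw [pvPg, pvPg, PySem.List.pySetD_of_nonneg h v hi0,
    PySem.List.pyGetD_eq_getElem _ _ hx0 (by simp [List.length_set, hlen]; omega),
    PySem.List.pyGetD_eq_getElem _ _ hx0 (by omega)]
  rw [List.getElem_set]
  by_cases hxi : x = i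
  · simp [hxi]
  · have : i.toNat ≠ x.toNat := by omega
    simp [this, hxi]

theorem pvPg_map {n : Nat} {ℓ : List Int} (hlen : ℓ.length = n) {x : Int}
    (hx : pvIdx n x) (f : Int → Int) :
    pvPg (ℓ.map f) x = f (pvPg ℓ x) := by
  obtain ⟨hx0, hx1⟩ := hx
  rw [pvPg, pvPg, PySem.List.pyGetD_eq_getElem _ _ hx0 (by simp [hlen]; omega),
    PySem.List.pyGetD_eq_getElem _ _ hx0 (by omega), List.getElem_map]

theorem pvPg_range {n : Nat} {x : Int} (hx : pvIdx n x) :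
    pvPg (PySem.List.pyRange 0 (n : Int)) x = x := by
  have := PySem.List.pyGetD_map_pyRange_of_nonneg id (n : Int) x 0 hx.1 hx.2
  simpa [pvPg] using this

theorem pvIter_succ' (h : List Int) (d : Nat) (x : Int) :
    pvIter h (d + 1) x = pvPg h (pvIter h d x) := by
  simp [pvIter, Function.iterate_succ_apply']

theorem pvIter_succ (h : List Int) (d : Nat) (x : Int) :
    pvIter h (d + 1) x = pvIter h d (pvPg h x) := by
  simp [pvIter, Function.iterate_succ_apply]

theorem pvIter_add (h : List Int) (a t : Nat) (x : Int) :
    pvIter h (a + t) x = pvIter h a (pvIter h t x) := by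
  simp [pvIter, Function.iterate_add_apply]

theorem pvRootAfter {h : List Int} {d : Nat} {x : Int} (hr : pvRoot h (pvIter h d x)) :
    ∀ e, d ≤ e → pvIter h e x = pvIter h d x := by
  intro e he
  induction e with
  | zero =>
    have hd : d = 0 := by omega
    simp [hd]
  | succ k ih =>
    rcases Nat.lt_or_ge d (k+1) with hlt | hge
    · have hk : d ≤ k := by omega
      rw [pvIter_succ', ih hk]; exact hr
    · have hd : d = k + 1 := by omega
      simp [hd]

theorem pvNoRevisit {h : List Int} {i : Int} {d : Nat}
    (hroot : pvRoot h (pvIter h d i)) (hni : ¬ pvRoot h i) :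
    ∀ t, 1 ≤ t → pvIter h t i ≠ i := by
  intro t ht heq
  rcases Nat.eq_zero_or_pos d with hd0 | hdpos
  · subst hd0; exact hni hroot
  have hmul : ∀ k : Nat, pvIter h (t * k) i = i := by
    intro k; induction k with
    | zero => simp [pvIter]
    | succ m ih =>
      have : t * (m + 1) = t * m + t := by ring
      rw [this, pvIter_add, heq, ih]
  have hge : d ≤ t * d := Nat.le_mul_of_pos_left d (by omega)
  have := pvRootAfter hroot (t * d) hge
  rw [hmul d] at this
  rw [← this] at hroot
  exact hni hroot

theorem pvIterIdx {n : Nat} {h : List Int} (hcl : ∀ x, pvIdx n x → pvIdx n (pvPg h x))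
    {i : Int} (hi : pvIdx n i) : ∀ t, pvIdx n (pvIter h t i) := by
  intro t
  induction t with
  | zero => simpa [pvIter] using hi
  | succ k ih => rw [pvIter_succ']; exact hcl _ ih

theorem pvDistBound {n : Nat} {h : List Int} (hg : pvGood n h) {i : Int} (hi : pvIdx n i) :
    ∃ d < n, pvRoot h (pvIter h d i) := by
  obtain ⟨hlen, hcl, hreach⟩ := hg
  obtain ⟨d, hd⟩ := hreach i hi
  have hP : ∃ e, pvRoot h (pvIter h e i) := ⟨d, hd⟩
  classical
  let d0 := Nat.find hP
  have hd0 : pvRoot h (pvIter h d0 i) := Nat.find_spec hP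
  have hmin : ∀ e < d0, ¬ pvRoot h (pvIter h e i) := fun e he => Nat.find_min hP he
  refine ⟨d0, ?_, hd0⟩
  -- injectivity of e ↦ pvIter h e i on range (d0+1)
  have hlt : ∀ a b, a < b → b < d0 + 1 → pvIter h a i = pvIter h b i → False := by
    intro a b hlt hb hab
    have key : pvIter h (d0 - b + a) i = pvIter h d0 i := by
      have h1 : pvIter h (d0 - b + a) i = pvIter h (d0 - b) (pvIter h a i) := pvIter_add h _ _ i
      have h2 : pvIter h (d0 - b + b) i = pvIter h (d0 - b) (pvIter h b i) := pvIter_add h _ _ i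
      rw [h1, hab, ← h2, Nat.sub_add_cancel (by omega)]
    have hnr : ¬ pvRoot h (pvIter h (d0 - b + a) i) := hmin _ (by omega)
    rw [key] at hnr
    exact hnr hd0
  have hinj : Set.InjOn (fun e => pvIter h e i) (Finset.range (d0 + 1)) := by
    intro a ha b hb hab
    simp only [Finset.coe_range, Set.mem_Iio] at ha hb
    simp only at hab
    rcases lt_trichotomy a b with hc | hc | hc
    · exact absurd (hlt a b hc hb hab) (fun f => f)
    · exact hc
    · exact absurd (hlt b a hc ha hab.symm) (fun f => f)
  have hmaps : ∀ e ∈ Finset.range (d0 + 1), pvIter h e i ∈ Finset.Ico (0 : Int) (n : Int) := by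
    intro e _
    have := pvIterIdx hcl hi e
    simp [Finset.mem_Ico]; exact ⟨this.1, this.2⟩
  have hcard := Finset.card_le_card_of_injOn _ hmaps hinj
  simp [Int.card_Ico] at hcard
  -- d0 + 1 ≤ n
  have hn : 0 < n := by
    rcases hi with ⟨h0, h1⟩; omega
  omega

theorem pvReachUnion {n : Nat} {h : List Int} (hlen : h.length = n)
    (hcl : ∀ x, pvIdx n x → pvIdx n (pvPg h x)) {a b : Int}
    (ha : pvIdx n a) (hb : pvIdx n b) (hra : pvRoot h a) (hrb : pvRoot h b) (hab : a ≠ b) :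
    ∀ d x, pvIdx n x → pvRoot h (pvIter h d x) →
      ∃ d', pvRoot (PySem.List.pySetD h a b) (pvIter (PySem.List.pySetD h a b) d' x) := by
  intro d
  induction d using Nat.strong_induction_on with
  | _ d ih =>
    intro x hx hr
    have hpg : ∀ y : Int, pvIdx n y → pvPg (PySem.List.pySetD h a b) y = if y = a then b else pvPg h y :=
      fun y hy => pvPg_set hlen ha hy b
    have hrb' : pvRoot (PySem.List.pySetD h a b) b := by
      rw [pvRoot, hpg b hb, if_neg (Ne.symm hab)]; exact hrb
    by_cases hrx : pvRoot h x
    · by_cases hxa : x = a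
      · refine ⟨1, ?_⟩
        rw [pvIter_succ', ]
        simp only [pvIter, Function.iterate_zero, id]
        rw [hpg x hx, if_pos hxa]
        exact hrb'
      · refine ⟨0, ?_⟩
        simp only [pvIter, Function.iterate_zero, id]
        rw [pvRoot, hpg x hx, if_neg hxa]
        exact hrx
    · -- x not a root, so x ≠ a, and d ≥ 1
      have hxa : x ≠ a := fun hxa => hrx (hxa ▸ hra)
      have hd1 : 1 ≤ d := by
        rcases Nat.eq_zero_or_pos d with h0 | h1
        · exfalso; apply hrx; simpa [h0, pvIter] using hr
        · exact h1
      have hy : pvIdx n (pvPg h x) := hcl x hx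
      have hr' : pvRoot h (pvIter h (d - 1) (pvPg h x)) := by
        rw [← pvIter_succ]
        have : d - 1 + 1 = d := by omega
        rw [this]; exact hr
      obtain ⟨d', hd'⟩ := ih (d - 1) (by omega) (pvPg h x) hy hr'
      refine ⟨d' + 1, ?_⟩
      rw [pvIter_succ, hpg x hx, if_neg hxa]
      exact hd'

theorem pvReachHalve {n : Nat} {h : List Int} (hlen : h.length = n)
    (hcl : ∀ x, pvIdx n x → pvIdx n (pvPg h x)) {i : Int}
    (hi : pvIdx n i) (hni : ¬ pvRoot h i) (hrev : ∀ t, 1 ≤ t → pvIter h t i ≠ i) :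
    ∀ d x, pvIdx n x → pvRoot h (pvIter h d x) →
      ∃ d', pvRoot (PySem.List.pySetD h i (pvPg h (pvPg h i))) (pvIter (PySem.List.pySetD h i (pvPg h (pvPg h i))) d' x) := by
  have hp : pvIdx n (pvPg h i) := hcl i hi
  have hg : pvIdx n (pvPg h (pvPg h i)) := hcl _ hp
  have hit2 : pvIter h 2 i = pvPg h (pvPg h i) := by
    show pvIter h (1 + 1) i = _
    rw [pvIter_succ', pvIter_succ']
    simp [pvIter]
  have hgi : pvPg h (pvPg h i) ≠ i := by
    rw [← hit2]; exact hrev 2 (by omega)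
  have hpg : ∀ y : Int, pvIdx n y →
      pvPg (PySem.List.pySetD h i (pvPg h (pvPg h i))) y = if y = i then pvPg h (pvPg h i) else pvPg h y :=
    fun y hy => pvPg_set hlen hi hy _
  intro d
  induction d using Nat.strong_induction_on with
  | _ d ih =>
    intro x hx hr
    by_cases hrx : pvRoot h x
    · have hxi : x ≠ i := fun hxi => hni (hxi ▸ hrx)
      refine ⟨0, ?_⟩
      simp only [pvIter, Function.iterate_zero, id]
      rw [pvRoot, hpg x hx, if_neg hxi]
      exact hrx
    · have hd1 : 1 ≤ d := by
        rcases Nat.eq_zero_or_pos d with h0 | h1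
        · exfalso; apply hrx; simpa [h0, pvIter] using hr
        · exact h1
      by_cases hxi : x = i
      · subst hxi
        rcases Nat.lt_or_ge d 2 with hd2 | hd2
        · -- d = 1 : the parent p is a root, and g = p
          have hd : d = 1 := by omega
          subst hd
          have hpr : pvRoot h (pvPg h x) := by
            simpa [pvIter_succ', pvIter] using hr
          have hgp : pvPg h (pvPg h x) = pvPg h x := hpr
          refine ⟨1, ?_⟩
          rw [pvIter_succ']
          simp only [pvIter, Function.iterate_zero, id]
          rw [hpg x hx, if_pos rfl, pvRoot, hpg _ hg, if_neg hgi, hgp]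
          exact hgp
        · -- d ≥ 2 : recurse on the grandparent
          have hwit : pvRoot h (pvIter h (d - 2) (pvPg h (pvPg h x))) := by
            rw [← hit2, ← pvIter_add]
            have : d - 2 + 2 = d := by omega
            rw [this]; exact hr
          obtain ⟨d', hd'⟩ := ih (d - 2) (by omega) (pvPg h (pvPg h x)) hg hwit
          refine ⟨d' + 1, ?_⟩
          rw [pvIter_succ, hpg x hx, if_pos rfl]
          exact hd'
      · have hy : pvIdx n (pvPg h x) := hcl x hx
        have hr' : pvRoot h (pvIter h (d - 1) (pvPg h x)) := by
          rw [← pvIter_succ]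
          have : d - 1 + 1 = d := by omega
          rw [this]; exact hr
        obtain ⟨d', hd'⟩ := ih (d - 1) (by omega) (pvPg h x) hy hr'
        refine ⟨d' + 1, ?_⟩
        rw [pvIter_succ, hpg x hx, if_neg hxi]
        exact hd'

theorem pvFind_spec {n : Nat} (ℓ : List Int) :
    ∀ d fuel (h : List Int) (i : Int), pvGood n h → pvLab n h ℓ → pvIdx n i →
      pvRoot h (pvIter h d i) → d < fuel →
      pvGood n (pvFind fuel h i).1 ∧ pvLab n (pvFind fuel h i).1 ℓ ∧
      (∀ x, pvIdx n x → (pvRoot (pvFind fuel h i).1 x ↔ pvRoot h x)) ∧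
      pvIdx n (pvFind fuel h i).2 ∧ pvRoot (pvFind fuel h i).1 (pvFind fuel h i).2 ∧
      pvPg ℓ (pvFind fuel h i).2 = pvPg ℓ i := by
  intro d
  induction d using Nat.strong_induction_on with
  | _ d ih =>
    intro fuel h i hG hL hi hr hdf
    obtain ⟨hlen, hcl, hreach⟩ := hG
    cases fuel with
    | zero => omega
    | succ fuel' =>
      by_cases hpi : pvPg h i = i
      · -- i is already a root: find returns (h, heads[i])
        have hstep : pvFind (fuel' + 1) h i = (h, pvPg h i) := by
          have hcond : ¬ (PySem.List.pyGetD h i 0 ≠ i) := by simpa [pvPg] using hpi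
          simp only [pvFind, if_neg hcond]
          rfl
        rw [hstep]
        refine ⟨⟨hlen, hcl, hreach⟩, hL, fun x _ => Iff.rfl, ?_, ?_, ?_⟩
        · simpa [hpi] using hi
        · simpa [pvRoot, hpi] using hpi
        · rw [hpi]
      · -- halve and continue at the grandparent
        have hni : ¬ pvRoot h i := hpi
        have hrev : ∀ t, 1 ≤ t → pvIter h t i ≠ i := pvNoRevisit hr hni
        have hp : pvIdx n (pvPg h i) := hcl i hi
        have hg : pvIdx n (pvPg h (pvPg h i)) := hcl _ hp
        have hit2 : pvIter h 2 i = pvPg h (pvPg h i) := by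
          show pvIter h (1 + 1) i = _
          rw [pvIter_succ', pvIter_succ']
          simp [pvIter]
        have hgi : pvPg h (pvPg h i) ≠ i := by
          rw [← hit2]; exact hrev 2 (by omega)
        set g := pvPg h (pvPg h i) with hgdef
        set h2 := PySem.List.pySetD h i g with h2def
        have hstep : pvFind (fuel' + 1) h i = pvFind fuel' h2 g := by
          rw [h2def, hgdef]
          simp only [pvFind, pvPg]
          rw [if_pos (by simpa [pvPg] using hpi)]
        have hpg : ∀ y : Int, pvIdx n y → pvPg h2 y = if y = i then g else pvPg h y :=
          fun y hy => pvPg_set hlen hi hy _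
        have hlen2 : h2.length = n := by
          rw [h2def, PySem.List.length_pySetD]; exact hlen
        have hcl2 : ∀ x, pvIdx n x → pvIdx n (pvPg h2 x) := by
          intro x hx; rw [hpg x hx]
          by_cases hxi : x = i
          · simpa [hxi] using hg
          · simpa [hxi] using hcl x hx
        have hreach2 : ∀ x, pvIdx n x → ∃ d', pvRoot h2 (pvIter h2 d' x) := by
          intro x hx
          obtain ⟨dx, hdx⟩ := hreach x hx
          exact pvReachHalve hlen hcl hi hni hrev dx x hx hdx
        have hG2 : pvGood n h2 := ⟨hlen2, hcl2, hreach2⟩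
        have hL2 : pvLab n h2 ℓ := by
          intro x hx
          rw [hpg x hx]
          by_cases hxi : x = i
          · rw [if_pos hxi, hgdef, hL _ hp, hL _ hi, hxi]
          · rw [if_neg hxi]; exact hL x hx
        have hroots2 : ∀ x, pvIdx n x → (pvRoot h2 x ↔ pvRoot h x) := by
          intro x hx
          by_cases hxi : x = i
          · subst hxi
            constructor
            · intro hrt; exfalso; rw [pvRoot, hpg x hx, if_pos rfl] at hrt; exact hgi hrt
            · intro hrt; exact absurd hrt hni
          · rw [pvRoot, pvRoot, hpg x hx, if_neg hxi]
        -- a root witness for g in h2, with distance small enough for the fuel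
        have hwit : ∃ d'' < fuel', pvRoot h2 (pvIter h2 d'' g) ∧ pvPg ℓ g = pvPg ℓ i ∧ d'' < d := by
          have hlg : pvPg ℓ g = pvPg ℓ i := by rw [hgdef, hL _ hp, hL _ hi]
          rcases Nat.lt_or_ge d 2 with hd2 | hd2
          · -- d = 1 (d = 0 would make i a root): the parent is a root and g is that root
            have hd1 : d = 1 := by
              rcases Nat.eq_zero_or_pos d with h0 | h1
              · exfalso; apply hni; simpa [h0, pvIter] using hr
              · omega
            have hpr : pvRoot h (pvPg h i) := by
              rw [hd1] at hr
              simpa [pvIter_succ', pvIter] using hr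
            have hgp : g = pvPg h i := by rw [hgdef, hpr]
            refine ⟨0, by omega, ?_, hlg, by omega⟩
            simp only [pvIter, Function.iterate_zero, id]
            rw [(hroots2 g hg), hgp]
            exact hpr
          · -- d ≥ 2: the chain of g in h2 is the chain of i in h shifted by 2
            have htrans : ∀ t, pvIter h2 t g = pvIter h (t + 2) i := by
              intro t
              induction t with
              | zero => simpa [pvIter] using hit2.symm
              | succ k ihk =>
                rw [pvIter_succ', ihk]
                have hne : pvIter h (k + 2) i ≠ i := hrev (k + 2) (by omega)
                have hIdx : pvIdx n (pvIter h (k + 2) i) := pvIterIdx hcl hi (k + 2)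
                rw [hpg _ hIdx, if_neg hne, ← pvIter_succ']
            have hrd : pvRoot h2 (pvIter h2 (d - 2) g) := by
              rw [htrans (d - 2)]
              have : d - 2 + 2 = d := by omega
              rw [this]
              have hIdx : pvIdx n (pvIter h d i) := pvIterIdx hcl hi d
              rw [hroots2 _ hIdx]
              exact hr
            exact ⟨d - 2, by omega, hrd, hlg, by omega⟩
        obtain ⟨d'', hd''f, hd''r, hlg, hd''d⟩ := hwit
        have hrec := ih d'' (by omega) fuel' h2 g hG2 hL2 hg hd''r hd''f
        obtain ⟨rG, rL, rRoots, rIdx, rRoot, rLab⟩ := hrec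
        rw [hstep]
        refine ⟨rG, rL, ?_, rIdx, rRoot, ?_⟩
        · intro x hx
          rw [rRoots x hx, hroots2 x hx]
        · rw [rLab, hlg]

theorem pvStep {lst : List (List Int)} {i j : Int} {sA sB : List Int × Int}
    (hi : pvIdx lst.length i) (hj : pvIdx lst.length j)
    (hInv : pvInv lst.length sA.1 sB.1) (hc : sA.2 = sB.2) :
    pvInv lst.length (pvBodyA lst i j sA).1 (pvBodyB lst i j sB).1 ∧
      (pvBodyA lst i j sA).2 = (pvBodyB lst i j sB).2 := by
  obtain ⟨hG, hlenB, hL, hinj⟩ := hInv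
  set n := lst.length with hn
  set ℓ := sB.1 with hℓ
  by_cases he : PySem.List.pyGetD (PySem.List.pyGetD lst i []) j 0 = 1
  · -- the edge is present
    have hlenA : sA.1.length = n := hG.1
    obtain ⟨d1, hd1n, hd1r⟩ := pvDistBound hG hi
    have hspec1 := pvFind_spec ℓ d1 (sA.1.length + 1) sA.1 i hG hL hi hd1r (by omega)
    set f1 := pvFind (sA.1.length + 1) sA.1 i with hf1
    obtain ⟨hG1, hL1, hroots1, hIdx1, hroot1, hlab1⟩ := hspec1
    obtain ⟨d2, hd2n, hd2r⟩ := pvDistBound hG1 hj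
    have hspec2 := pvFind_spec ℓ d2 (f1.1.length + 1) f1.1 j hG1 hL1 hj hd2r
      (by have := hG1.1; omega)
    set f2 := pvFind (f1.1.length + 1) f1.1 j with hf2
    obtain ⟨hG2, hL2, hroots2, hIdx2, hroot2, hlab2⟩ := hspec2
    -- both returned values are roots at every stage
    have hr1f1 : pvRoot f1.1 f1.2 := hroot1
    have hr1A : pvRoot sA.1 f1.2 := (hroots1 f1.2 hIdx1).mp hr1f1
    have hr1f2 : pvRoot f2.1 f1.2 := (hroots2 f1.2 hIdx1).mpr hr1f1
    have hr2f1 : pvRoot f1.1 f2.2 := (hroots2 f2.2 hIdx2).mp hroot2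
    have hr2A : pvRoot sA.1 f2.2 := (hroots1 f2.2 hIdx2).mp hr2f1
    -- the two branch conditions agree
    have hbr : f1.2 = f2.2 ↔ pvPg ℓ i = pvPg ℓ j := by
      constructor
      · intro hq; rw [← hlab1, ← hlab2, hq]
      · intro hq
        exact hinj f1.2 f2.2 hIdx1 hIdx2 hr1A hr2A (by rw [hlab1, hlab2, hq])
    -- the A-side result reduces
    have hA : pvBodyA lst i j sA =
        (if f1.2 ≠ f2.2 then (PySem.List.pySetD f2.1 f1.2 f2.2, sA.2 - 1) else (f2.1, sA.2)) := by
      rw [pvBodyA, if_pos he, ← hf1]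
    by_cases heq : f1.2 = f2.2
    · -- same root: A only halves paths, B does nothing
      have hlabeq : pvPg ℓ i = pvPg ℓ j := hbr.mp heq
      have hB : pvBodyB lst i j sB = sB := by
        rw [pvBodyB]
        rw [if_neg]
        intro hcon
        exact hcon.2 (by rw [hℓ] at hlabeq; exact hlabeq)
      rw [hA, hB, if_neg (by simpa using heq)]
      dsimp only
      refine ⟨⟨hG2, hlenB, hL2, ?_⟩, hc⟩
      intro x y hx hy hrx hry hpq
      exact hinj x y hx hy
        ((hroots1 x hx).mp ((hroots2 x hx).mp hrx))
        ((hroots1 y hy).mp ((hroots2 y hy).mp hry)) hpq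
    · -- distinct roots: A links the roots, B merges the two label classes
      have hlabne : pvPg ℓ i ≠ pvPg ℓ j := fun hq => heq (hbr.mpr hq)
      have hB : pvBodyB lst i j sB =
          (ℓ.map (fun x => if x = pvPg ℓ i then pvPg ℓ j else x), sB.2 - 1) := by
        have hcond : PySem.List.pyGetD (PySem.List.pyGetD lst i []) j 0 = 1 ∧
            PySem.List.pyGetD sB.1 i 0 ≠ PySem.List.pyGetD sB.1 j 0 := ⟨he, hlabne⟩
        rw [pvBodyB, if_pos hcond]
        rfl
      rw [hA, hB, if_pos (by simpa using heq)]
      dsimp only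
      have hlen2 : f2.1.length = n := hG2.1
      have hcl2 := hG2.2.1
      have hpg3 : ∀ x, pvIdx n x →
          pvPg (PySem.List.pySetD f2.1 f1.2 f2.2) x = if x = f1.2 then f2.2 else pvPg f2.1 x :=
        fun x hx => pvPg_set hlen2 hIdx1 hx _
      have hmap : ∀ x, pvIdx n x →
          pvPg (ℓ.map (fun x => if x = pvPg ℓ i then pvPg ℓ j else x)) x
            = (fun t => if t = pvPg ℓ i then pvPg ℓ j else t) (pvPg ℓ x) :=
        fun x hx => pvPg_map hlenB hx _
      constructor
      · constructor
        · -- pvGood of the linked forest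
          refine ⟨by rw [PySem.List.length_pySetD]; exact hlen2, ?_, ?_⟩
          · intro x hx
            rw [hpg3 x hx]
            by_cases hxr : x = f1.2
            · simpa [hxr] using hIdx2
            · simpa [hxr] using hcl2 x hx
          · intro x hx
            obtain ⟨dx, hdx⟩ := hG2.2.2 x hx
            exact pvReachUnion hlen2 hcl2 hIdx1 hIdx2 hr1f2 hroot2 heq dx x hx hdx
        refine ⟨by simpa using hlenB, ?_, ?_⟩
        · -- pvLab for the linked forest and merged labels
          intro x hx
          have hx3 : pvIdx n (pvPg (PySem.List.pySetD f2.1 f1.2 f2.2) x) := by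
            rw [hpg3 x hx]
            by_cases hxr : x = f1.2
            · simpa [hxr] using hIdx2
            · simpa [hxr] using hcl2 x hx
          rw [hmap _ hx3, hmap _ hx]
          simp only
          rw [hpg3 x hx]
          by_cases hxr : x = f1.2
          · rw [if_pos hxr, hxr]
            rw [hlab1, hlab2]
            rw [if_neg (Ne.symm hlabne), if_pos rfl]
          · rw [if_neg hxr, hL2 x hx]
        · -- root-label injectivity after the merge
          intro x y hx hy hrx hry hpq
          have hxne : x ≠ f1.2 := by
            intro hxx
            rw [pvRoot, hpg3 x hx, if_pos hxx] at hrx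
            exact heq (by rw [← hxx]; exact hrx.symm)
          have hyne : y ≠ f1.2 := by
            intro hyy
            rw [pvRoot, hpg3 y hy, if_pos hyy] at hry
            exact heq (by rw [← hyy]; exact hry.symm)
          rw [pvRoot, hpg3 x hx, if_neg hxne] at hrx
          rw [pvRoot, hpg3 y hy, if_neg hyne] at hry
          have hrxA : pvRoot sA.1 x := (hroots1 x hx).mp ((hroots2 x hx).mp hrx)
          have hryA : pvRoot sA.1 y := (hroots1 y hy).mp ((hroots2 y hy).mp hry)
          rw [hmap _ hx, hmap _ hy] at hpq
          simp only at hpq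
          have hxo : pvPg ℓ x ≠ pvPg ℓ i := by
            intro hcon
            exact hxne (hinj x f1.2 hx hIdx1 hrxA hr1A (by rw [hcon, hlab1]))
          have hyo : pvPg ℓ y ≠ pvPg ℓ i := by
            intro hcon
            exact hyne (hinj y f1.2 hy hIdx1 hryA hr1A (by rw [hcon, hlab1]))
          rw [if_neg hxo, if_neg hyo] at hpq
          exact hinj x y hx hy hrxA hryA hpq
      · exact by rw [hc]
  · -- no edge: both sides leave their state unchanged
    have hA : pvBodyA lst i j sA = sA := by rw [pvBodyA, if_neg he]
    have hB : pvBodyB lst i j sB = sB := by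
      rw [pvBodyB, if_neg]; exact fun hcon => he hcon.1
    rw [hA, hB]
    exact ⟨⟨hG, hlenB, hL, hinj⟩, hc⟩

theorem pvFold {lst : List (List Int)}
    (f g : List Int × Int → Int → List Int × Int)
    (hstep : ∀ i sA sB, pvIdx lst.length i → pvInv lst.length sA.1 sB.1 → sA.2 = sB.2 →
      pvInv lst.length (f sA i).1 (g sB i).1 ∧ (f sA i).2 = (g sB i).2) :
    ∀ (xs : List Int), (∀ x ∈ xs, pvIdx lst.length x) →
      ∀ sA sB, pvInv lst.length sA.1 sB.1 → sA.2 = sB.2 →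
        pvInv lst.length (xs.foldl f sA).1 (xs.foldl g sB).1 ∧ (xs.foldl f sA).2 = (xs.foldl g sB).2 := by
  intro xs
  induction xs with
  | nil => intro _ sA sB h1 h2; exact ⟨h1, h2⟩
  | cons x xs ih =>
    intro hmem sA sB h1 h2
    obtain ⟨h1', h2'⟩ := hstep x sA sB (hmem x (by simp)) h1 h2
    exact ih (fun z hz => hmem z (by simp [hz])) (f sA x) (g sB x) h1' h2'

theorem pvRange_len (n : Nat) : (PySem.List.pyRange 0 (n : Int)).length = n := by
  rw [PySem.List.pyRange_zero_natCast]; simp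

theorem pvInit (n : Nat) : pvInv n (PySem.List.pyRange 0 (n : Int)) (PySem.List.pyRange 0 (n : Int)) := by
  refine ⟨⟨pvRange_len n, ?_, ?_⟩, pvRange_len n, ?_, ?_⟩
  · intro x hx; rw [pvPg_range hx]; exact hx
  · intro x hx; exact ⟨0, by simp [pvIter, pvRoot]; rw [pvPg_range hx]⟩
  · intro x hx; rw [pvPg_range hx]; exact pvPg_range hx
  · intro x y hx hy _ _ hpq
    rw [pvPg_range hx, pvPg_range hy] at hpq
    exact hpq

theorem pvMain (lst : List (List Int)) : friends_circle lst = friends_circle_alt lst := by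
  rw [friends_circle, friends_circle_alt]
  have hmem : ∀ x ∈ PySem.List.pyRange 0 (lst.length : Int), pvIdx lst.length x := by
    intro x hx
    rw [PySem.List.mem_pyRange_one] at hx
    exact hx
  have houter := pvFold
    (fun s i => (PySem.List.pyRange 0 (lst.length : Int)).foldl (fun s j => pvBodyA lst i j s) s)
    (fun s i => (PySem.List.pyRange 0 (lst.length : Int)).foldl (fun s j => pvBodyB lst i j s) s)
    (fun i sA sB hiI hInv hcc =>
      pvFold (fun s j => pvBodyA lst i j s) (fun s j => pvBodyB lst i j s)
        (fun j sA' sB' hjI hInv' hcc' => pvStep hiI hjI hInv' hcc')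
        (PySem.List.pyRange 0 (lst.length : Int)) hmem sA sB hInv hcc)
    (PySem.List.pyRange 0 (lst.length : Int)) hmem
    (PySem.List.pyRange 0 (lst.length : Int), (lst.length : Int))
    (PySem.List.pyRange 0 (lst.length : Int), (lst.length : Int))
    (pvInit lst.length) rfl
  exact houter.2

-- ===== VERDICT (by name: the statement is the Claim_ definition above) =====
theorem friends_circle_spec : Claim_equal_friends_circle := by
  intro lst _ _
  exact pvMain lst
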